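-- pv_equiv track=rewrite | github.com/Zjtep/jz_runescape_bots | core/RS.py | getAllInventoryPosition
-- ===== SOURCE A (Python) =====
-- def getAllInventoryPosition(win_coord):
--     item_size = 36
--     spacing = 7
--
--     item = []
--
--     x1 = win_coord[0]
--     y1 = win_coord[1]
--     x2 = win_coord[0] + item_size
--     y2 = win_coord[1] + item_size
--
--     for m in range(7):
--         for n in range(4):
--             # print n
--
--             item.append([x1, y1, x2, y2])
--
--             x1 += item_size
--             x2 += item_size
--             x1 += spacing
--             x2 += spacing
--         x1 = win_coord[0]
--         x2 = win_coord[0] + item_size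
--         y1 += item_size
--         y2 += item_size
--
--     return item
-- ===== SOURCE B (Python) =====
-- def getAllInventoryPosition(win_coord):
--     # stateless: each slot computed directly from its grid indices (column step 43 = 36+7, row step 36)
--     x0 = win_coord[0]
--     y0 = win_coord[1]
--     return [[x0 + 43 * n, y0 + 36 * m, x0 + 36 + 43 * n, y0 + 36 + 36 * m]
--             for m in range(7) for n in range(4)]
-- ===== Notes on version B (the rewrite author's own statement) =====
-- stated objective: simpler
-- what changed: Replaced the four mutable running accumulators (x1,y1,x2,y2 with per-iteration increments and per-row resets) by a stateless comprehension that computes each slot's coordinates in closed form from its grid indices (m,n).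
import Mathlib
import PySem

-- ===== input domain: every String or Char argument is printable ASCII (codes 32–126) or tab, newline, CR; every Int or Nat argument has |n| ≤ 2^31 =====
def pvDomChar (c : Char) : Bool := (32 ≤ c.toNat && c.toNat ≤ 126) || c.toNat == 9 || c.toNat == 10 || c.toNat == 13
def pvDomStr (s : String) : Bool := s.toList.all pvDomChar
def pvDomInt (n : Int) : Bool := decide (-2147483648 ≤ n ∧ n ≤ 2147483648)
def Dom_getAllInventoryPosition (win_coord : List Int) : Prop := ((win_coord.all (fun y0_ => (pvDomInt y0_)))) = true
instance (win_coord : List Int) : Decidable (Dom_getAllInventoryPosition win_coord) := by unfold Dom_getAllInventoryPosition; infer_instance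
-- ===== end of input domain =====

-- B replaces A's four mutable accumulators with a stateless closed-form comprehension over grid indices.

-- ===== PORT A =====
-- A's nested loops carry state (item, x1, y1, x2, y2); inner loop bumps x by 36 then 7, outer resets x, bumps y by 36.
def getAllInventoryPosition (win_coord : List Int) : List (List Int) :=
  match PySem.List.pyGet? win_coord 0, PySem.List.pyGet? win_coord 1 with
  | some w0, some w1 =>
    let item_size : Int := 36
    let spacing : Int := 7
    let init : List (List Int) × Int × Int × Int × Int :=
      ([], w0, w1, w0 + item_size, w1 + item_size)
    let fin := (PySem.List.pyRange 0 7 1).foldl (fun st _m =>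
      let inner := (PySem.List.pyRange 0 4 1).foldl
        (fun (s : List (List Int) × Int × Int × Int × Int) _n =>
          match s with
          | (item, x1, y1, x2, y2) =>
            (item ++ [[x1, y1, x2, y2]], x1 + item_size + spacing, y1, x2 + item_size + spacing, y2))
        st
      match inner with
      | (item, _, y1, _, y2) =>
        (item, w0, y1 + item_size, w0 + item_size, y2 + item_size)) init
    fin.1
  | _, _ => []  -- IndexError: excluded by Pre_

-- ===== PORT B =====
def getAllInventoryPosition_alt (win_coord : List Int) : List (List Int) :=
  match PySem.List.pyGet? win_coord 0 with
  | none => []  -- IndexError: excluded by Pre_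
  | some x0 =>
    match PySem.List.pyGet? win_coord 1 with
    | none => []  -- IndexError: excluded by Pre_
    | some y0 =>
      (PySem.List.pyRange 0 7 1).flatMap (fun m =>
        (PySem.List.pyRange 0 4 1).map (fun n =>
          [x0 + 43 * n, y0 + 36 * m, x0 + 36 + 43 * n, y0 + 36 + 36 * m]))

-- ===== PRECONDITION & SPEC =====
-- A raises IndexError when win_coord has fewer than 2 elements.
def Pre_getAllInventoryPosition (win_coord : List Int) : Prop := 2 ≤ win_coord.length
instance (win_coord : List Int) : Decidable (Pre_getAllInventoryPosition win_coord) := by unfold Pre_getAllInventoryPosition; infer_instance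
def pvWitness_getAllInventoryPosition : List Int := [10, 20]
def Spec_getAllInventoryPosition (win_coord : List Int) (out : List (List Int)) : Prop := out = getAllInventoryPosition_alt win_coord
instance (win_coord : List Int) (out : List (List Int)) : Decidable (Spec_getAllInventoryPosition win_coord out) := by unfold Spec_getAllInventoryPosition; infer_instance

-- ===== CLAIM (what is proved, stated in full; the proofs are below) =====
def Claim_equal_getAllInventoryPosition : Prop := ∀ (win_coord : List Int), Dom_getAllInventoryPosition win_coord → Pre_getAllInventoryPosition win_coord → Spec_getAllInventoryPosition win_coord (getAllInventoryPosition win_coord)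

-- ===== LEMMAS AND PROOFS =====
lemma getAllInventoryPosition_cons_eq (a b : Int) (t : List Int) :
    getAllInventoryPosition (a :: b :: t) = getAllInventoryPosition_alt (a :: b :: t) := by
  have h7 : PySem.List.pyRange 0 7 1 = [0, 1, 2, 3, 4, 5, 6] := by decide
  have h4 : PySem.List.pyRange 0 4 1 = [0, 1, 2, 3] := by decide
  have hpos : (0:Int) ≤ (t.length:Int) + 1 := by positivity
  have g0 : PySem.List.pyGet? (a :: b :: t) 0 = some a := by
    simp [PySem.List.pyGet?, PySem.List.pyIdx?, hpos]
  have g1 : PySem.List.pyGet? (a :: b :: t) 1 = some b := by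
    simp [PySem.List.pyGet?, PySem.List.pyIdx?]
  simp only [getAllInventoryPosition, getAllInventoryPosition_alt, g0, g1, h7, h4,
    List.foldl, List.flatMap, List.map, List.flatten, List.append, List.cons_append,
    List.nil_append]
  ring_nf

-- ===== VERDICT (by name: the statement is the Claim_ definition above) =====
theorem getAllInventoryPosition_spec : Claim_equal_getAllInventoryPosition := by
  intro win_coord _ hpre
  unfold Spec_getAllInventoryPosition
  match win_coord, hpre with
  | a :: b :: t, _ => exact (getAllInventoryPosition_cons_eq a b t).symm ▸ rfl
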